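-- pv_equiv track=rewrite | github.com/Eg0rS/document-recognition-system | ml-processing-service/models_activities.py | order_arrays
-- ===== SOURCE A (Python) =====
-- def order_arrays(ordered_fields, unordered_values, coordinates):
--     # Создаем словари для хранения упорядоченных значений и координат
--     ordered_values = []
--     ordered_coordinates = []
--
--     # Множество для отслеживания уникальных значений
--     seen_values = set()
--
--     # Проходим по каждому полю из упорядоченных полей
--     for field in ordered_fields:
--         # Находим индекс поля в неупорядоченном списке значений
--         if field in unordered_values:
--             indexes = [i for i, f in enumerate(unordered_values) if f == field]
--             for index in indexes:
--                 value = unordered_values[index]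
--                 if value not in seen_values:  # Проверяем наличие значения в множестве
--                     # Добавляем значение в список упорядоченных значений
--                     ordered_values.append(value)
--                     # Добавляем соответствующие координаты из списка координат
--                     ordered_coordinates.append(coordinates[index])
--                     # Добавляем значение в множество, чтобы избежать дубликатов
--                     seen_values.add(value)
--
--     return ordered_values, ordered_coordinates
-- ===== SOURCE B (Python) =====
-- def order_arrays(ordered_fields, unordered_values, coordinates):
--     # One pass: map each value to the index of its first occurrence.
--     first_idx = {}
--     for i, v in enumerate(unordered_values):
--         if v not in first_idx:
--             first_idx[v] = i
--     ordered_values = []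
--     ordered_coordinates = []
--     emitted = set()
--     for field in ordered_fields:
--         i = first_idx.get(field)
--         if i is not None and field not in emitted:
--             ordered_values.append(field)
--             ordered_coordinates.append(coordinates[i])
--             emitted.add(field)
--     return ordered_values, ordered_coordinates
-- ===== Notes on version B (the rewrite author's own statement) =====
-- stated objective: faster
-- what changed: B builds a first-occurrence index dictionary over unordered_values in one pass and then does a single pass over ordered_fields, replacing A's per-field enumerate scan and inner occurrence loop.
import Mathlib
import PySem

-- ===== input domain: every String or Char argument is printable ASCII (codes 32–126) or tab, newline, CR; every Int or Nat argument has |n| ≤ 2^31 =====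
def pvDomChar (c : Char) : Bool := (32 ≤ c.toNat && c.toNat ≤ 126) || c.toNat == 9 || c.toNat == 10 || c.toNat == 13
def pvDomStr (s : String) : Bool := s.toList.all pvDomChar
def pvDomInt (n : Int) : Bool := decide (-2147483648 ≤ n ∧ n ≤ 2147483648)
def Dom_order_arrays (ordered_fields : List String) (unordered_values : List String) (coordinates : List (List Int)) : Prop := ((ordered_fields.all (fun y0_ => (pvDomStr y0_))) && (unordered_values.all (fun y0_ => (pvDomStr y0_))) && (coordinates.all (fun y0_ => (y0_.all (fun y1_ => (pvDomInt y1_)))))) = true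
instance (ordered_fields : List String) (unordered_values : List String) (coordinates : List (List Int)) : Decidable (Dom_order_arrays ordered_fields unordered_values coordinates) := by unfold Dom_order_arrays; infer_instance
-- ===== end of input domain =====

-- B replaces A's per-field inner scans with a one-pass first-occurrence index dict + single pass over fields (faster).


-- ===== PORT A =====
-- inner loop body: 'for index in indexes: …' (coordinates[index] is total here ONLY under Pre_, via pyGetD)
def pvStateA := List String × List (List Int) × PySem.Set String

def pvInnerA (unordered_values : List String) (coordinates : List (List Int))
    (st : pvStateA) (index : Int) : pvStateA :=
  let value := PySem.List.pyGetD unordered_values index ""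
  if st.2.2.contains value then st
  else (st.1 ++ [value], st.2.1 ++ [PySem.List.pyGetD coordinates index []], st.2.2.add value)

-- body of 'for field in ordered_fields: …'
def pvStepA (unordered_values : List String) (coordinates : List (List Int))
    (st : pvStateA) (field : String) : pvStateA :=
  if unordered_values.contains field then
    let indexes := ((PySem.List.enumerate unordered_values).filter (fun p => p.2 == field)).map (·.1)
    indexes.foldl (pvInnerA unordered_values coordinates) st
  else st

def order_arrays (ordered_fields : List String) (unordered_values : List String) (coordinates : List (List Int)) : List String × List (List Int) :=
  let st := ordered_fields.foldl (pvStepA unordered_values coordinates) ([], [], PySem.Set.empty)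
  (st.1, st.2.1)

-- ===== PORT B =====
-- 'for i, v in enumerate(unordered_values): if v not in first_idx: first_idx[v] = i'
def pvFirstIdx (unordered_values : List String) : PySem.Dict String Int :=
  (PySem.List.enumerate unordered_values).foldl
    (fun d p => if d.contains p.2 then d else d.insert p.2 p.1) PySem.Dict.empty

-- body of 'for field in ordered_fields: …' in B
def pvStepB (firstIdx : PySem.Dict String Int) (coordinates : List (List Int))
    (st : pvStateA) (field : String) : pvStateA :=
  match firstIdx.get? field with
  | some i =>
      if st.2.2.contains field then st
      else (st.1 ++ [field], st.2.1 ++ [PySem.List.pyGetD coordinates i []], st.2.2.add field)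
  | none => st

def order_arrays_alt (ordered_fields : List String) (unordered_values : List String) (coordinates : List (List Int)) : List String × List (List Int) :=
  let firstIdx := pvFirstIdx unordered_values
  let st := ordered_fields.foldl (pvStepB firstIdx coordinates) ([], [], PySem.Set.empty)
  (st.1, st.2.1)

-- ===== PRECONDITION & SPEC =====
-- Pre_ excludes exactly the inputs where Python A raises IndexError: a field of ordered_fields whose
-- first occurrence index in unordered_values is ≥ len(coordinates).  (Python B raises there too.)
def Pre_order_arrays (ordered_fields : List String) (unordered_values : List String) (coordinates : List (List Int)) : Prop :=
  (ordered_fields.all (fun f =>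
    match PySem.List.index? unordered_values f with
    | some k => decide (k < coordinates.length)
    | none => true)) = true
instance (ordered_fields : List String) (unordered_values : List String) (coordinates : List (List Int)) : Decidable (Pre_order_arrays ordered_fields unordered_values coordinates) := by unfold Pre_order_arrays; infer_instance

def pvWitness_order_arrays : List String × List String × List (List Int) :=
  (["b", "a", "z"], ["a", "b", "a"], [[1, 2], [3], [4]])

def Spec_order_arrays (ordered_fields : List String) (unordered_values : List String) (coordinates : List (List Int)) (out : List String × List (List Int)) : Prop := out = order_arrays_alt ordered_fields unordered_values coordinates
instance (ordered_fields : List String) (unordered_values : List String) (coordinates : List (List Int)) (out : List String × List (List Int)) : Decidable (Spec_order_arrays ordered_fields unordered_values coordinates out) := by unfold Spec_order_arrays; infer_instance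

-- ===== CLAIM (what is proved, stated in full; the proofs are below) =====
def Claim_equal_order_arrays : Prop := ∀ (ordered_fields : List String) (unordered_values : List String) (coordinates : List (List Int)), Dom_order_arrays ordered_fields unordered_values coordinates → Pre_order_arrays ordered_fields unordered_values coordinates → Spec_order_arrays ordered_fields unordered_values coordinates (order_arrays ordered_fields unordered_values coordinates)

-- ===== LEMMAS AND PROOFS =====

-- the first-index dict returns the first-occurrence index (shifted by the enumerate start)
theorem pvFirstIdx_get (xs : List String) (s : Int) (d : PySem.Dict String Int) (v : String) :
    ((PySem.List.enumerate xs s).foldl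
      (fun d p => if d.contains p.2 then d else d.insert p.2 p.1) d).get? v
    = ((d.get? v).orElse (fun _ => (PySem.List.index? xs v).map (fun k => s + k))) := by
  induction xs generalizing s d with
  | nil => cases h : d.get? v <;> simp [PySem.List.enumerate_nil, PySem.List.index?, h, Option.orElse]
  | cons x xs ih =>
    rw [PySem.List.enumerate_cons, List.foldl_cons, ih]
    by_cases hv : x = v
    · subst hv
      by_cases hc : d.contains x = true
      · have hsome : (d.get? x).isSome := by
          rw [← PySem.Dict.contains_eq_isSome_get?]; exact hc
        obtain ⟨w, hw⟩ := Option.isSome_iff_exists.mp hsome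
        simp [hc, hw, Option.orElse]
      · have hnone : d.get? x = none := by
          cases h : d.get? x with
          | none => rfl
          | some w => exact absurd (by rw [PySem.Dict.contains_eq_isSome_get?, h]; rfl) hc
        rw [if_neg hc, PySem.List.index?_cons_self]
        simp [PySem.Dict.get?_insert_self, hnone, Option.orElse]
    · rw [PySem.List.index?_cons_of_ne xs hv]
      generalize hk : PySem.List.index? xs v = o
      by_cases hc : d.contains x = true
      · rw [if_pos hc]
        cases d.get? v <;> cases o <;> (simp [Option.orElse]; try ring)
      · rw [if_neg hc, PySem.Dict.get?_insert_of_ne _ _ (fun h => hv h.symm)]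
        cases d.get? v <;> cases o <;> (simp [Option.orElse]; try ring)

-- if the seen-set already holds `field`, the inner loop over occurrence indexes is the identity
theorem pvInnerA_skip (unordered_values : List String) (coordinates : List (List Int))
    (field : String) (l : List Int) (st : pvStateA)
    (hall : ∀ j ∈ l, PySem.List.pyGetD unordered_values j "" = field)
    (hseen : st.2.2.contains field = true) :
    l.foldl (pvInnerA unordered_values coordinates) st = st := by
  induction l generalizing st with
  | nil => rfl
  | cons j l ih =>
    have hj := hall j (by simp)
    rw [List.foldl_cons]
    have : pvInnerA unordered_values coordinates st j = st := by
      simp [pvInnerA, hj, (PySem.Set.contains_iff _ _).mp hseen]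
    rw [this]
    exact ih st (fun j hjl => hall j (List.mem_cons_of_mem _ hjl)) hseen

-- shape of A's `indexes` list relative to the first occurrence index
theorem pvIndexes_shape (unordered_values : List String) (field : String) (k : Nat)
    (hk : PySem.List.index? unordered_values field = some k) :
    ∃ rest, ((PySem.List.enumerate unordered_values 0).filter (fun p => p.2 == field)).map (·.1)
      = ((k : Int) :: rest) := by
  rw [PySem.List.index?_eq_some_iff] at hk
  obtain ⟨pre, suf, rfl, hlen, hnot⟩ := hk
  refine ⟨((PySem.List.enumerate suf ((0 : Int) + (pre.length : Int) + 1)).filter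
      (fun p => p.2 == field)).map (·.1), ?_⟩
  rw [PySem.List.enumerate_append, List.filter_append]
  have hpre : (PySem.List.enumerate pre 0).filter (fun p => p.2 == field) = [] := by
    rw [List.filter_eq_nil_iff]
    intro p hp
    rw [PySem.List.mem_enumerate_iff] at hp
    obtain ⟨j, hj, rfl⟩ := hp
    simp only [beq_iff_eq]
    intro h
    exact hnot (h ▸ List.getElem_mem hj)
  rw [hpre, PySem.List.enumerate_cons]
  simp [hlen]

-- every element of `indexes` dereferences to `field`
theorem pvIndexes_all (unordered_values : List String) (field : String) (j : Int)
    (hj : j ∈ ((PySem.List.enumerate unordered_values 0).filter (fun p => p.2 == field)).map (·.1)) :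
    PySem.List.pyGetD unordered_values j "" = field := by
  simp only [List.mem_map, List.mem_filter] at hj
  obtain ⟨p, ⟨hmem, hfld⟩, hfst⟩ := hj
  rw [PySem.List.mem_enumerate_iff] at hmem
  obtain ⟨k, hlt, rfl⟩ := hmem
  simp at hfld
  subst hfst
  simp [PySem.List.pyGetD_natCast, List.getD_eq_getElem?_getD, hlt, hfld]

-- the per-field bodies of A and B agree on every state
theorem pvStep_eq (unordered_values : List String) (coordinates : List (List Int))
    (st : pvStateA) (field : String) :
    pvStepA unordered_values coordinates st field
      = pvStepB (pvFirstIdx unordered_values) coordinates st field := by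
  have hget : (pvFirstIdx unordered_values).get? field
      = (PySem.List.index? unordered_values field).map (fun k => ((k : Int))) := by
    rw [pvFirstIdx, pvFirstIdx_get, PySem.Dict.get?_empty]
    cases PySem.List.index? unordered_values field <;> simp [Option.orElse]
  by_cases hmem : field ∈ unordered_values
  · obtain ⟨k, hk⟩ := Option.isSome_iff_exists.mp
      ((PySem.List.index?_isSome_iff _ _).mpr hmem)
    obtain ⟨rest, hrest⟩ := pvIndexes_shape unordered_values field k hk
    have hallrest : ∀ j ∈ rest, PySem.List.pyGetD unordered_values j "" = field := by
      intro j hj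
      exact pvIndexes_all unordered_values field j (by rw [hrest]; simp [hj])
    have hkval : PySem.List.pyGetD unordered_values (k : Int) "" = field :=
      pvIndexes_all unordered_values field _ (by rw [hrest]; simp)
    rw [pvStepA, pvStepB, hget, hk]
    simp only [List.contains_iff_mem, hmem, if_true, hrest]
    rw [List.foldl_cons]
    by_cases hseen : st.2.2.contains field = true
    · have hin : field ∈ st.2.2 := (PySem.Set.contains_iff _ _).mp hseen
      have h1 : pvInnerA unordered_values coordinates st (k : Int) = st := by
        simp [pvInnerA, hkval, hin]
      rw [h1, pvInnerA_skip unordered_values coordinates field rest st hallrest hseen]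
      simp [hin]
    · have hno : field ∉ st.2.2 := fun h => hseen ((PySem.Set.contains_iff _ _).mpr h)
      have h1 : pvInnerA unordered_values coordinates st (k : Int)
          = (st.1 ++ [field], st.2.1 ++ [PySem.List.pyGetD coordinates (k : Int) []], st.2.2.add field) := by
        simp [pvInnerA, hkval, hno]
      rw [h1, pvInnerA_skip unordered_values coordinates field rest _ hallrest
        (by simp [PySem.Set.mem_add])]
      simp [hno]
  · rw [pvStepA, pvStepB, hget, (PySem.List.index?_eq_none_iff _ _).mpr hmem]
    simp [hmem]

-- ===== VERDICT (by name: the statement is the Claim_ definition above) =====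
theorem order_arrays_spec : Claim_equal_order_arrays := by
  intro ordered_fields unordered_values coordinates _ _
  unfold Spec_order_arrays order_arrays order_arrays_alt
  have : pvStepA unordered_values coordinates
      = pvStepB (pvFirstIdx unordered_values) coordinates := by
    funext st field; exact pvStep_eq unordered_values coordinates st field
  rw [this]
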